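-- pv_equiv track=rewrite | github.com/landron/Problems | hackerrank/python/moderate_strings_minion_game.py | play_1
-- ===== SOURCE A (Python) =====
-- def play_1(string):
--     '''solve the game: first variant, time-outs'''
--     vowels = consonants = 0
--     for i, _ in enumerate(string):
--         for j in range(len(string)-i):
--             if string[j] in "AEIOU":
--                 vowels += 1
--             else:
--                 consonants += 1
--     return (vowels, consonants)
-- ===== SOURCE B (Python) =====
-- def play_1(string):
--     '''solve the game: single pass, each index j is scanned (len-j) times by A'''
--     n = len(string)
--     vowels = consonants = 0
--     for j, ch in enumerate(string):
--         if ch in "AEIOU":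
--             vowels += n - j
--         else:
--             consonants += n - j
--     return (vowels, consonants)
-- ===== Notes on version B (the rewrite author's own statement) =====
-- stated objective: faster
-- what changed: Replaced the nested O(n^2) substring-prefix loop by a single pass in which index j contributes its multiplicity (n-j) directly to its category.
import Mathlib
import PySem

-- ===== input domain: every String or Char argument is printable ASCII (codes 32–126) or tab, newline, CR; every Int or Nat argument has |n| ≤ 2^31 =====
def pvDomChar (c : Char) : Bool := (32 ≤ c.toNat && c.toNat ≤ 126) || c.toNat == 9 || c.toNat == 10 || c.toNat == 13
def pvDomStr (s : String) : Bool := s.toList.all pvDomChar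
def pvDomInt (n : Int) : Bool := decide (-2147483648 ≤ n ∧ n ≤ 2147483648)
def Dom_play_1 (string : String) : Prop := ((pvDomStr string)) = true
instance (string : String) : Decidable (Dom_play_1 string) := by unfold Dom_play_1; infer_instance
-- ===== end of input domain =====

-- B replaces A's nested O(n^2) prefix re-scan by a single pass where index j contributes (n-j) to its category (objective: faster, asymptotic).

-- shared helper: membership of one character in "AEIOU"
def pvVowel (c : Char) : Bool := c = 'A' ∨ c = 'E' ∨ c = 'I' ∨ c = 'O' ∨ c = 'U'

-- ===== PORT A =====
-- nested loop: for i,_ in enumerate(string): for j in range(len(string)-i): test string[j]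
-- string[j] is always in range here (j < len-i ≤ len), so the total pyGetD is exact
def play_1 (string : String) : List Int :=
  let cs := string.toList
  let n : Int := PySem.Str.len string
  let r := (PySem.List.enumerate cs 0).foldl
    (fun (p : Int × Int) ie =>
      (PySem.List.pyRange 0 (n - ie.1) 1).foldl
        (fun (q : Int × Int) j =>
          if pvVowel (PySem.List.pyGetD cs j ' ') then (q.1 + 1, q.2) else (q.1, q.2 + 1)) p)
    (0, 0)
  [r.1, r.2]

-- ===== PORT B =====
-- single pass: for j, ch in enumerate(string): the winning category gains n - j
def play_1_alt (string : String) : List Int :=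
  let n : Int := PySem.Str.len string
  let r := (PySem.List.enumerate string.toList 0).foldl
    (fun (p : Int × Int) jc =>
      if pvVowel jc.2 then (p.1 + (n - jc.1), p.2) else (p.1, p.2 + (n - jc.1)))
    (0, 0)
  [r.1, r.2]

-- ===== PRECONDITION & SPEC =====
def Spec_play_1 (string : String) (out : List Int) : Prop := out = play_1_alt string
instance (string : String) (out : List Int) : Decidable (Spec_play_1 string out) := by unfold Spec_play_1; infer_instance

-- ===== CLAIM (what is proved, stated in full; the proofs are below) =====
def Claim_equal_play_1 : Prop := ∀ (string : String), Dom_play_1 string → Spec_play_1 string (play_1 string)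

-- ===== LEMMAS AND PROOFS =====

-- 0/1 indicator of a vowel at position j (out-of-range defaults to ' ', not a vowel)
def pvInd (cs : List Char) (j : Nat) : Nat := if pvVowel (cs.getD j ' ') then 1 else 0

lemma countP_take (cs : List Char) (k : Nat) :
    (cs.take k).countP pvVowel = ∑ j ∈ Finset.range k, pvInd cs j := by
  induction k with
  | zero => simp
  | succ k ih =>
    rw [List.take_add_one, List.countP_append, ih, Finset.sum_range_succ]
    by_cases h : k < cs.length
    · simp [pvInd, List.getElem?_eq_getElem h, List.getD, List.countP_cons]
    · have : cs[k]? = none := List.getElem?_eq_none (by omega)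
      simp [pvInd, this, List.getD, pvVowel]

lemma sum_prefix_counts (cs : List Char) (N : Nat) :
    ∑ m ∈ Finset.range N, (cs.take (m+1)).countP pvVowel
      = ∑ j ∈ Finset.range N, (N - j) * pvInd cs j := by
  induction N with
  | zero => simp
  | succ N ih =>
    rw [Finset.sum_range_succ, ih, countP_take, Finset.sum_range_succ (fun j => pvInd cs j) N,
        Finset.sum_range_succ (fun j => (N + 1 - j) * pvInd cs j) N]
    have h1 : ∀ j ∈ Finset.range N, (N + 1 - j) * pvInd cs j = (N - j) * pvInd cs j + pvInd cs j := by
      intro j hj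
      have : j < N := Finset.mem_range.mp hj
      have : N + 1 - j = (N - j) + 1 := by omega
      rw [this, Nat.succ_mul]
    have h2 : N + 1 - N = 1 := by omega
    rw [Finset.sum_congr rfl h1, Finset.sum_add_distrib, h2, one_mul]
    omega

-- A's inner loop over range(m) for m ≤ len adds the vowel/consonant counts of the length-m prefix
lemma innerFold (cs : List Char) (m : Nat) (hm : m ≤ cs.length) (p : Int × Int) :
    (PySem.List.pyRange 0 (m : Int) 1).foldl
      (fun (q : Int × Int) j =>
        if pvVowel (PySem.List.pyGetD cs j ' ') then (q.1 + 1, q.2) else (q.1, q.2 + 1)) p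
    = (p.1 + ((cs.take m).countP pvVowel : Int),
       p.2 + ((m : Int) - ((cs.take m).countP pvVowel : Int))) := by
  induction m with
  | zero => simp
  | succ m ih =>
    have hcast : ((m + 1 : Nat) : Int) = (m : Int) + 1 := by push_cast; ring
    rw [hcast, PySem.List.pyRange_one_succ_right (by positivity), List.foldl_append,
        ih (by omega)]
    have hm' : m < cs.length := by omega
    have hget : PySem.List.pyGetD cs (m : Int) ' ' = cs[m] := by
      rw [PySem.List.pyGetD_natCast]; simp [List.getD, List.getElem?_eq_getElem hm']
    have htake : cs.take (m+1) = cs.take m ++ [cs[m]] := by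
      rw [List.take_add_one, List.getElem?_eq_getElem hm']; rfl
    simp only [List.foldl_cons, List.foldl_nil, hget, htake, List.countP_append,
      List.countP_cons]
    by_cases hv : pvVowel cs[m]
    · simp [hv]; ring
    · simp [hv]; ring

lemma sum_map_range_eq (n : Nat) (f : Nat → Int) :
    ((List.range n).map f).sum = ∑ i ∈ Finset.range n, f i := rfl

-- the vowel sums of the two programs agree (double counting of the prefix scans)
lemma keyV (cs : List Char) :
    ∑ i ∈ Finset.range cs.length, (((cs.take (cs.length - i)).countP pvVowel : Nat) : Int)
      = ∑ j ∈ Finset.range cs.length,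
          (if pvVowel (cs.getD j ' ') then ((cs.length : Int) - (j : Int)) else 0) := by
  set n := cs.length with hn
  have hrefl : ∑ i ∈ Finset.range n, (cs.take (n - i)).countP pvVowel
      = ∑ m ∈ Finset.range n, (cs.take (m+1)).countP pvVowel := by
    rw [← Finset.sum_range_reflect (fun m => (cs.take (m+1)).countP pvVowel) n]
    refine Finset.sum_congr rfl ?_
    intro j hj
    have hj' : j < n := Finset.mem_range.mp hj
    have : n - 1 - j + 1 = n - j := by omega
    simp only [this]
  rw [← Nat.cast_sum, hrefl, sum_prefix_counts, Nat.cast_sum]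
  refine Finset.sum_congr rfl ?_
  intro j hj
  have hj' : j < n := Finset.mem_range.mp hj
  unfold pvInd
  by_cases hv : pvVowel (cs.getD j ' ')
  · simp only [hv, if_true, mul_one]
    push_cast [Nat.cast_sub (by omega : j ≤ n)]
    ring
  · rw [if_neg hv, if_neg hv]; simp

-- the consonant sums agree: each side is (total weight) minus its vowel sum
lemma keyC (cs : List Char) :
    ∑ i ∈ Finset.range cs.length,
        ((((cs.length - i : Nat)) : Int) - (((cs.take (cs.length - i)).countP pvVowel : Nat) : Int))
      = ∑ j ∈ Finset.range cs.length,
          (if pvVowel (cs.getD j ' ') then 0 else ((cs.length : Int) - (j : Int))) := by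
  set n := cs.length with hn
  rw [Finset.sum_sub_distrib, keyV]
  have hrhs : ∀ j ∈ Finset.range n,
      (if pvVowel (cs.getD j ' ') then (0 : Int) else ((n : Int) - (j : Int)))
        = (((n - j : Nat) : Int))
          - (if pvVowel (cs.getD j ' ') then ((n : Int) - (j : Int)) else 0) := by
    intro j hj
    have hj' : j < n := Finset.mem_range.mp hj
    have : ((n - j : Nat) : Int) = (n : Int) - (j : Int) := by omega
    rw [this]
    by_cases hv : pvVowel (cs.getD j ' ')
    · rw [if_pos hv, if_pos hv]; ring
    · rw [if_neg hv, if_neg hv]; ring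
  rw [Finset.sum_congr rfl hrhs, Finset.sum_sub_distrib]

-- ===== VERDICT (by name: the statement is the Claim_ definition above) =====
theorem play_1_spec : Claim_equal_play_1 := by
  intro string _
  unfold Spec_play_1 play_1 play_1_alt
  simp only [PySem.Str.len_eq]
  set cs := string.toList with hcs
  set n := cs.length with hn
  rw [PySem.List.enumerate_eq_map_pyRange cs ' ']
  have hlen : PySem.List.len cs = (n : Int) := by simp [hn]
  rw [hlen, PySem.List.pyRange_zero_nat, List.map_map, List.foldl_map, List.foldl_map]
  simp only [Function.comp_apply]
  have hA : ∀ y ∈ List.range n, ∀ (x : Int × Int),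
      (PySem.List.pyRange 0 ((n : Int) - (y : Int))).foldl
        (fun (q : Int × Int) j =>
          if pvVowel (PySem.List.pyGetD cs j ' ') then (q.1 + 1, q.2) else (q.1, q.2 + 1)) x
      = (x.1 + (((cs.take (n - y)).countP pvVowel : Nat) : Int),
         x.2 + ((((n - y : Nat)) : Int) - (((cs.take (n - y)).countP pvVowel : Nat) : Int))) := by
    intro y hy x
    have hy' : y < n := List.mem_range.mp hy
    have hb : ((n : Int) - (y : Int)) = (((n - y : Nat)) : Int) := by omega
    rw [hb, innerFold cs (n - y) (by omega) x]
  have hB : ∀ y ∈ List.range n, ∀ (x : Int × Int),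
      (if pvVowel (PySem.List.pyGetD cs ((y : Nat) : Int) ' ')
        then (x.1 + ((n : Int) - (y : Int)), x.2) else (x.1, x.2 + ((n : Int) - (y : Int))))
      = (x.1 + (if pvVowel (cs.getD y ' ') then ((n : Int) - (y : Int)) else 0),
         x.2 + (if pvVowel (cs.getD y ' ') then 0 else ((n : Int) - (y : Int)))) := by
    intro y hy x
    rw [PySem.List.pyGetD_natCast]
    by_cases hv : pvVowel (cs.getD y ' ')
    · rw [if_pos hv, if_pos hv, if_pos hv]; simp
    · rw [if_neg hv, if_neg hv, if_neg hv]; simp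
  rw [PySem.List.foldl_congr_mem' _ _ _ _ hA, PySem.List.foldl_congr_mem' _ _ _ _ hB]
  rw [PySem.List.foldl_prod_mk
        (f := fun (a : Int) (y : Nat) => a + (((cs.take (n - y)).countP pvVowel : Nat) : Int))
        (g := fun (a : Int) (y : Nat) =>
          a + ((((n - y : Nat)) : Int) - (((cs.take (n - y)).countP pvVowel : Nat) : Int)))]
  rw [PySem.List.foldl_prod_mk
        (f := fun (a : Int) (y : Nat) => a + (if pvVowel (cs.getD y ' ') then ((n : Int) - (y : Int)) else 0))
        (g := fun (a : Int) (y : Nat) => a + (if pvVowel (cs.getD y ' ') then 0 else ((n : Int) - (y : Int))))]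
  simp only [PySem.List.foldl_add, zero_add]
  rw [sum_map_range_eq, sum_map_range_eq, sum_map_range_eq, sum_map_range_eq]
  rw [keyV, keyC]
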